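-- pv_equiv track=rewrite | github.com/excraptor/komplementum | ekviv.py | calculateTypes
-- ===== SOURCE A (Python) =====
-- def getTypeOfPartition(partition):
--     """
--     assuming its sorted
--     """
--     res = ""
--     for c in partition:
--         res += str(len(c)) + "+"
--     return res[:-1]
--
-- def calculateTypes(partitions):
--     res = dict()
--     for eq in partitions:
--         eqType = getTypeOfPartition(eq)
--         if(eqType in res.keys()):
--             res[eqType] += 1
--         else:
--             res[eqType] = 1
--     return res
-- ===== SOURCE B (Python) =====
-- def calculateTypes(partitions):
--     keys = ["+".join(str(len(c)) for c in p) for p in partitions]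
--     res = []
--     while keys:
--         k = keys[0]
--         rest = [x for x in keys if x != k]
--         res.append((k, len(keys) - len(rest)))
--         keys = rest
--     return dict(res)
-- ===== Notes on version B (the rewrite author's own statement) =====
-- stated objective: alternative
-- what changed: Replaces A's incrementally maintained counting dict (per-partition membership test then increment-or-insert, keys built by concatenation with a trailing-'+' strip) by successive filtering: precompute all '+'.join key strings, then repeatedly take the first remaining key, obtain its count as the length drop after filtering out all its occurrences, and continue on the filtered remainder; no counter or map is maintained at all.
import Mathlib
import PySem

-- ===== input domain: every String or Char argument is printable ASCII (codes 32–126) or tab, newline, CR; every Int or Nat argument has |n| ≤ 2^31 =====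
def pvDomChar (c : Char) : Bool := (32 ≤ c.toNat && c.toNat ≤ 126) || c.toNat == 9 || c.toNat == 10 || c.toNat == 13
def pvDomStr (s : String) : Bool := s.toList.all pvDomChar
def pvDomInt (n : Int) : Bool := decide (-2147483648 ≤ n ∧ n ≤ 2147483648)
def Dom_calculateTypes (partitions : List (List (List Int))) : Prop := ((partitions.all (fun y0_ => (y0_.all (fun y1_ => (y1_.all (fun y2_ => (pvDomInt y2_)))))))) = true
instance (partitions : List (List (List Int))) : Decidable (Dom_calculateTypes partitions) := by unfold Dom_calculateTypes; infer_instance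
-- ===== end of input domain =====

-- B replaces A's maintained counting dict by successive filtering over the precomputed
-- key list (count = length drop after filtering a key out); alternative, not faster.

-- ===== PORT A =====
-- getTypeOfPartition: build "len+len+…+" by string concatenation, then drop the last char with res[:-1]
def getTypeOfPartitionA (partition : List (List Int)) : String :=
  let res := partition.foldl
    (fun r c => r ++ (PySem.Int.toChars ((c.length : Int)) ++ ['+'])) ([] : List Char)
  String.mk (PySem.List.slice res none (some (-1)))

def calculateTypes (partitions : List (List (List Int))) : List (String × Int) :=
  (partitions.foldl
    (fun res eq =>
      let eqType := getTypeOfPartitionA eq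
      if res.contains eqType then res.insert eqType (res.getD eqType 0 + 1)
      else res.insert eqType 1)
    (PySem.Dict.empty : PySem.Dict String Int)).items

-- ===== PORT B =====
-- "+".join(str(len(c)) for c in p)
def getTypeOfPartitionB (partition : List (List Int)) : String :=
  String.mk (PySem.Chars.join ['+'] (partition.map (fun c => PySem.Int.toChars ((c.length : Int)))))

-- the while loop: take the first key, filter out all of its occurrences, record the
-- length drop as its count, continue on the filtered remainder
def ctLoop (keys : List String) : List (String × Int) :=
  match keys with
  | [] => []
  | k :: t =>
    let rest := (k :: t).filter (fun x => x != k)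
    (k, ((k :: t).length : Int) - (rest.length : Int)) :: ctLoop rest
termination_by keys.length
decreasing_by
  simp only [List.filter_cons, bne_self_eq_false, List.length_cons]
  exact Nat.lt_succ_of_le (List.length_filter_le _ t)

def calculateTypes_alt (partitions : List (List (List Int))) : List (String × Int) :=
  ctLoop (partitions.map getTypeOfPartitionB)

-- ===== PRECONDITION & SPEC =====
def Spec_calculateTypes (partitions : List (List (List Int))) (out : List (String × Int)) : Prop := out = calculateTypes_alt partitions
instance (partitions : List (List (List Int))) (out : List (String × Int)) : Decidable (Spec_calculateTypes partitions out) := by unfold Spec_calculateTypes; infer_instance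

-- ===== CLAIM (what is proved, stated in full; the proofs are below) =====
def Claim_equal_calculateTypes : Prop := ∀ (partitions : List (List (List Int))), Dom_calculateTypes partitions → Spec_calculateTypes partitions (calculateTypes partitions)

-- ===== LEMMAS AND PROOFS =====

-- dropping the trailing '+' of the concatenation is exactly the '+'-join
lemma dropLast_flatMap_plus {α : Type} (f : α → List Char) :
    ∀ p : List α,
      (p.flatMap (fun c => f c ++ ['+'])).dropLast = PySem.Chars.join ['+'] (p.map f)
  | [] => by simp [PySem.Chars.join_nil]
  | [c] => by
      simp [PySem.Chars.join_singleton]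
  | c :: c' :: t => by
      have h : ((c' :: t).flatMap (fun c => f c ++ ['+'])) ≠ [] := by
        simp [List.flatMap_cons]
      rw [List.flatMap_cons, List.dropLast_append_of_ne_nil h,
        dropLast_flatMap_plus f (c' :: t)]
      simp [PySem.Chars.join_cons_cons]

lemma typeA_eq_typeB (p : List (List Int)) : getTypeOfPartitionA p = getTypeOfPartitionB p := by
  unfold getTypeOfPartitionA getTypeOfPartitionB
  show String.mk (PySem.List.slice
      (p.foldl (fun r c => r ++ (PySem.Int.toChars ((c.length : Int)) ++ ['+'])) ([] : List Char))
      none (some (-1))) = _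
  rw [PySem.List.foldl_append_eq_flatMap, PySem.List.slice_to_neg_one, List.nil_append,
    dropLast_flatMap_plus (fun c => PySem.Int.toChars ((c.length : Int))) p]

-- ofList commutes with filter (first occurrences survive filtering either way)
lemma ofList_filter (p : String → Bool) (t : List String) :
    PySem.Set.ofList (t.filter p) = (PySem.Set.ofList t).filter p := by
  induction t using List.reverseRecOn with
  | nil => rfl
  | append_singleton xs x ih =>
    rw [PySem.Set.ofList_append_singleton, List.filter_append]
    by_cases hp : p x
    · have hfx : List.filter p [x] = [x] := by simp [hp]
      rw [hfx, PySem.Set.ofList_append_singleton, ih]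
      by_cases hm : x ∈ PySem.Set.ofList xs
      · rw [PySem.Set.add_of_mem hm,
          PySem.Set.add_of_mem (List.mem_filter.mpr ⟨hm, hp⟩)]
      · rw [PySem.Set.add_of_not_mem hm,
          PySem.Set.add_of_not_mem (fun h => hm (List.mem_filter.mp h).1),
          List.filter_append, hfx]
    · have hfx : List.filter p [x] = [] := by simp [hp]
      rw [hfx, List.append_nil, ih]
      by_cases hm : x ∈ PySem.Set.ofList xs
      · rw [PySem.Set.add_of_mem hm]
      · rw [PySem.Set.add_of_not_mem hm, List.filter_append, hfx, List.append_nil]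

lemma discard_eq_filter (s : List String) (x : String) :
    PySem.Set.discard s x = s.filter (fun y => y != x) := rfl

lemma countP_ne_add_count (t : List String) (k : String) :
    (t.countP (fun x => x != k)) + t.count k = t.length := by
  induction t with
  | nil => rfl
  | cons x t ih => by_cases h : x = k <;> simp [h] <;> omega

-- the while loop produces exactly Counter(keys).items()
lemma ctLoop_eq : ∀ (n : Nat) (keys : List String), keys.length ≤ n →
    ctLoop keys = (PySem.Set.ofList keys).map (fun k => (k, (keys.count k : Int)))
  | _, [], _ => by rw [ctLoop]; rfl
  | Nat.succ n, k :: t, hn => by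
    have hrest : (k :: t).filter (fun x => x != k) = t.filter (fun x => x != k) := by
      simp
    have hlen : (t.filter (fun x => x != k)).length ≤ n := by
      have := List.length_filter_le (fun x => x != k) t
      simp only [List.length_cons, Nat.succ_le_succ_iff] at hn
      omega
    rw [ctLoop]
    simp only [hrest]
    rw [ctLoop_eq n (t.filter (fun x => x != k)) hlen,
      PySem.Set.ofList_cons, discard_eq_filter, ← ofList_filter]
    refine List.cons_eq_cons.mpr ⟨?_, ?_⟩
    · refine congrArg (Prod.mk k) ?_
      have hc := countP_ne_add_count t k
      have hf : (t.filter (fun x => x != k)).length = t.countP (fun x => x != k) :=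
        List.countP_eq_length_filter.symm
      simp only [List.count_cons_self, List.length_cons, hf]
      push_cast
      omega
    · refine List.map_congr_left (fun k' hk' => ?_)
      have hne : k' ≠ k := by
        have := (PySem.Set.mem_ofList (t.filter (fun x => x != k)) k').mp hk'
        have := (List.mem_filter.mp this).2
        simpa using this
      have hne' : ¬ k = k' := fun h => hne h.symm
      rw [List.count_filter (by simpa using hne)]
      simp [hne']

-- ===== VERDICT (by name: the statement is the Claim_ definition above) =====
theorem calculateTypes_spec : Claim_equal_calculateTypes := by
  intro partitions _
  unfold Spec_calculateTypes calculateTypes calculateTypes_alt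
  have hcongr :
      partitions.foldl
        (fun res eq =>
          let eqType := getTypeOfPartitionA eq
          if res.contains eqType then res.insert eqType (res.getD eqType 0 + 1)
          else res.insert eqType 1)
        (PySem.Dict.empty : PySem.Dict String Int)
      = partitions.foldl
        (fun res eq => res.insert (getTypeOfPartitionA eq)
          (res.getD (getTypeOfPartitionA eq) 0 + 1))
        (PySem.Dict.empty : PySem.Dict String Int) := by
    apply PySem.List.foldl_congr_mem
    intro d eq _
    by_cases h : d.contains (getTypeOfPartitionA eq)
    · simp [h]
    · simp only [Bool.not_eq_true] at h
      simp [h, PySem.Dict.getD_of_not_contains _ _ h]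
  rw [hcongr]
  have hmap :
      partitions.foldl
        (fun res eq => res.insert (getTypeOfPartitionA eq)
          (res.getD (getTypeOfPartitionA eq) 0 + 1))
        (PySem.Dict.empty : PySem.Dict String Int)
      = (partitions.map getTypeOfPartitionA).foldl
        (fun res k => res.insert k (res.getD k 0 + 1))
        (PySem.Dict.empty : PySem.Dict String Int) := by
    rw [List.foldl_map]
  rw [hmap, PySem.Dict.foldl_insert_getD_add_one_eq_counter, PySem.Dict.items_counter]
  have hk : partitions.map getTypeOfPartitionA = partitions.map getTypeOfPartitionB :=
    List.map_congr_left (fun p _ => typeA_eq_typeB p)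
  rw [hk, ctLoop_eq (partitions.map getTypeOfPartitionB).length _ (le_refl _)]
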